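-- pv_equiv track=rewrite | github.com/msalman231/sample_chat_bot_food_order | chatbot_service.py | detect_emotional_state
-- ===== SOURCE A (Python) =====
-- def detect_emotional_state(user_message):
--     """Detect user's emotional state with intensity and specific emotions"""
--     lower_message = user_message.lower()
--
--     # Comprehensive emotional vocabulary
--     emotional_indicators = {
--         'very_negative': {
--             'keywords': ['devastated', 'destroyed', 'ruined', 'hopeless', 'suicide', 'kill myself', 'end it all', 'can\'t take it', 'hate my life', 'want to die'],
--             'intensity': 'very_high',
--             'emotion': 'crisis'
--         },
--         'negative_high': {
--             'keywords': ['worst day ever', 'horrible', 'terrible', 'awful', 'miserable', 'depressed', 'devastated', 'heartbroken', 'furious', 'livid'],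
--             'intensity': 'high',
--             'emotion': 'very_negative'
--         },
--         'negative_medium': {
--             'keywords': ['sad', 'upset', 'angry', 'frustrated', 'disappointed', 'stressed', 'worried', 'anxious', 'down', 'blue', 'tired', 'exhausted'],
--             'intensity': 'medium',
--             'emotion': 'negative'
--         },
--         'negative_low': {
--             'keywords': ['bad day', 'not great', 'could be better', 'meh', 'okay i guess', 'not feeling it', 'bit down'],
--             'intensity': 'low',
--             'emotion': 'slightly_negative'
--         },
--         'positive': {
--             'keywords': ['happy', 'great', 'awesome', 'fantastic', 'wonderful', 'excited', 'amazing', 'perfect', 'love', 'best day'],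
--             'intensity': 'high',
--             'emotion': 'positive'
--         },
--         'celebratory': {
--             'keywords': ['celebrating', 'birthday', 'anniversary', 'promotion', 'got the job', 'engaged', 'married', 'graduation'],
--             'intensity': 'high',
--             'emotion': 'celebratory'
--         },
--         'lonely': {
--             'keywords': ['alone', 'lonely', 'no one cares', 'by myself', 'isolated', 'no friends', 'nobody understands'],
--             'intensity': 'medium',
--             'emotion': 'lonely'
--         },
--         'sick': {
--             'keywords': ['sick', 'ill', 'not feeling well', 'under the weather', 'flu', 'cold', 'fever', 'headache'],
--             'intensity': 'medium',
--             'emotion': 'unwell'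
--         }
--     }
--
--     detected_emotions = []
--     for category, data in emotional_indicators.items():
--         for keyword in data['keywords']:
--             if keyword in lower_message:
--                 detected_emotions.append({
--                     'category': category,
--                     'keyword': keyword,
--                     'intensity': data['intensity'],
--                     'emotion': data['emotion']
--                 })
--
--     # Return the most intense emotion found, or neutral
--     if detected_emotions:
--         # Sort by intensity priority
--         intensity_order = {'very_high': 4, 'high': 3, 'medium': 2, 'low': 1}
--         detected_emotions.sort(key=lambda x: intensity_order.get(x['intensity'], 0), reverse=True)
--         return detected_emotions[0]
--
--     return {'emotion': 'neutral', 'intensity': 'none', 'category': 'neutral'}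
-- ===== SOURCE B (Python) =====
-- # Precedence-table re-implementation: scan intensity tiers from most to least
-- # intense and return the first keyword match, instead of collecting all
-- # matches and sorting.  Tier order groups A's categories by intensity while
-- # keeping their original relative order, so the first hit is exactly the
-- # earliest most-intense match.
--
-- _TIERS = [
--     # very_high
--     [('very_negative', 'very_high', 'crisis',
--       ['devastated', 'destroyed', 'ruined', 'hopeless', 'suicide', 'kill myself', 'end it all', 'can\'t take it', 'hate my life', 'want to die'])],
--     # high
--     [('negative_high', 'high', 'very_negative',
--       ['worst day ever', 'horrible', 'terrible', 'awful', 'miserable', 'depressed', 'devastated', 'heartbroken', 'furious', 'livid']),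
--      ('positive', 'high', 'positive',
--       ['happy', 'great', 'awesome', 'fantastic', 'wonderful', 'excited', 'amazing', 'perfect', 'love', 'best day']),
--      ('celebratory', 'high', 'celebratory',
--       ['celebrating', 'birthday', 'anniversary', 'promotion', 'got the job', 'engaged', 'married', 'graduation'])],
--     # medium
--     [('negative_medium', 'medium', 'negative',
--       ['sad', 'upset', 'angry', 'frustrated', 'disappointed', 'stressed', 'worried', 'anxious', 'down', 'blue', 'tired', 'exhausted']),
--      ('lonely', 'medium', 'lonely',
--       ['alone', 'lonely', 'no one cares', 'by myself', 'isolated', 'no friends', 'nobody understands']),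
--      ('sick', 'medium', 'unwell',
--       ['sick', 'ill', 'not feeling well', 'under the weather', 'flu', 'cold', 'fever', 'headache'])],
--     # low
--     [('negative_low', 'low', 'slightly_negative',
--       ['bad day', 'not great', 'could be better', 'meh', 'okay i guess', 'not feeling it', 'bit down'])],
-- ]
--
--
-- def detect_emotional_state(user_message):
--     lower_message = user_message.lower()
--     for tier in _TIERS:
--         for category, intensity, emotion, keywords in tier:
--             for keyword in keywords:
--                 if keyword in lower_message:
--                     return {'category': category, 'keyword': keyword,
--                             'intensity': intensity, 'emotion': emotion}
--     return {'emotion': 'neutral', 'intensity': 'none', 'category': 'neutral'}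
-- ===== Notes on version B (the rewrite author's own statement) =====
-- stated objective: simpler
-- what changed: Instead of collecting every keyword match and stably sorting the list by intensity rank, B scans a precedence table (categories grouped by intensity tier, most intense first, original order within a tier) and returns the first match, exiting early.
import Mathlib
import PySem

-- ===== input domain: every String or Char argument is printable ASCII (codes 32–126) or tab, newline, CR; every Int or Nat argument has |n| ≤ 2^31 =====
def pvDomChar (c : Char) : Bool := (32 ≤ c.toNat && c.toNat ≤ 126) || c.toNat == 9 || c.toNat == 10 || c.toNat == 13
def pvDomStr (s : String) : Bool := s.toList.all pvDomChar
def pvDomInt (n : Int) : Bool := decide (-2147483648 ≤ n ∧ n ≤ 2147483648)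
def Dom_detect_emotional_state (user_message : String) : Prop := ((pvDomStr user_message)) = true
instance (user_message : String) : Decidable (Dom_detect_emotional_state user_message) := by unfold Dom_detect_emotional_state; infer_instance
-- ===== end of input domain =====

-- B replaces A's collect-all-matches-then-stable-sort with a precedence table
-- (categories grouped by intensity tier, most intense first) scanned for the
-- FIRST match — simpler: no match list, no sort, early exit.

-- the result dict both programs build for a match: keys in insertion order
def pvMkEmotion (category keyword intensity emotion : String) : List (String × String) :=
  [("category", category), ("keyword", keyword), ("intensity", intensity), ("emotion", emotion)]

-- ===== PORT A =====
-- emotional_indicators.items(): (category, (keywords, intensity, emotion)) in insertion order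
def pvIndicatorsA : List (String × List String × String × String) :=
  [ ("very_negative", (["devastated", "destroyed", "ruined", "hopeless", "suicide", "kill myself", "end it all", "can't take it", "hate my life", "want to die"], "very_high", "crisis")),
    ("negative_high", (["worst day ever", "horrible", "terrible", "awful", "miserable", "depressed", "devastated", "heartbroken", "furious", "livid"], "high", "very_negative")),
    ("negative_medium", (["sad", "upset", "angry", "frustrated", "disappointed", "stressed", "worried", "anxious", "down", "blue", "tired", "exhausted"], "medium", "negative")),
    ("negative_low", (["bad day", "not great", "could be better", "meh", "okay i guess", "not feeling it", "bit down"], "low", "slightly_negative")),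
    ("positive", (["happy", "great", "awesome", "fantastic", "wonderful", "excited", "amazing", "perfect", "love", "best day"], "high", "positive")),
    ("celebratory", (["celebrating", "birthday", "anniversary", "promotion", "got the job", "engaged", "married", "graduation"], "high", "celebratory")),
    ("lonely", (["alone", "lonely", "no one cares", "by myself", "isolated", "no friends", "nobody understands"], "medium", "lonely")),
    ("sick", (["sick", "ill", "not feeling well", "under the weather", "flu", "cold", "fever", "headache"], "medium", "unwell")) ]

def pvIntensityOrder : PySem.Dict String Int :=
  PySem.Dict.ofList [("very_high", 4), ("high", 3), ("medium", 2), ("low", 1)]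

-- sort key: intensity_order.get(x['intensity'], 0); the 'intensity' key is
-- always present in the dicts A builds, so the .getD "" never fires
def pvKeyA (x : List (String × String)) : Int :=
  PySem.Dict.getD pvIntensityOrder (((PySem.Dict.ofList x).get? "intensity").getD "") 0

def detect_emotional_state (user_message : String) : List (String × String) :=
  let lower_message := PySem.Str.lower user_message
  let detected := pvIndicatorsA.foldl (fun acc row =>
    row.2.1.foldl (fun acc keyword =>
      if PySem.Str.isIn keyword lower_message then
        acc ++ [pvMkEmotion row.1 keyword row.2.2.1 row.2.2.2]
      else acc) acc) []
  if detected ≠ [] then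
    -- detected.sort(key=…, reverse=True); return detected[0] (list nonempty here)
    (PySem.List.sorted detected pvKeyA true).headI
  else [("emotion", "neutral"), ("intensity", "none"), ("category", "neutral")]

-- ===== PORT B =====
-- B's precedence table: tiers from most to least intense, each row (category, intensity, emotion, keywords)
def pvTiersB : List (List (String × String × String × List String)) :=
  [ [ ("very_negative", "very_high", "crisis", ["devastated", "destroyed", "ruined", "hopeless", "suicide", "kill myself", "end it all", "can't take it", "hate my life", "want to die"]) ],
    [ ("negative_high", "high", "very_negative", ["worst day ever", "horrible", "terrible", "awful", "miserable", "depressed", "devastated", "heartbroken", "furious", "livid"]),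
      ("positive", "high", "positive", ["happy", "great", "awesome", "fantastic", "wonderful", "excited", "amazing", "perfect", "love", "best day"]),
      ("celebratory", "high", "celebratory", ["celebrating", "birthday", "anniversary", "promotion", "got the job", "engaged", "married", "graduation"]) ],
    [ ("negative_medium", "medium", "negative", ["sad", "upset", "angry", "frustrated", "disappointed", "stressed", "worried", "anxious", "down", "blue", "tired", "exhausted"]),
      ("lonely", "medium", "lonely", ["alone", "lonely", "no one cares", "by myself", "isolated", "no friends", "nobody understands"]),
      ("sick", "medium", "unwell", ["sick", "ill", "not feeling well", "under the weather", "flu", "cold", "fever", "headache"]) ],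
    [ ("negative_low", "low", "slightly_negative", ["bad day", "not great", "could be better", "meh", "okay i guess", "not feeling it", "bit down"]) ] ]

-- the triple 'for … return' early-exit loop is List.findSome? at each level
def detect_emotional_state_alt (user_message : String) : List (String × String) :=
  let lower_message := PySem.Str.lower user_message
  match pvTiersB.findSome? (fun tier =>
    tier.findSome? (fun row =>
      row.2.2.2.findSome? (fun keyword =>
        if PySem.Str.isIn keyword lower_message then
          some (pvMkEmotion row.1 keyword row.2.1 row.2.2.1)
        else none))) with
  | some d => d
  | none => [("emotion", "neutral"), ("intensity", "none"), ("category", "neutral")]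

-- ===== PRECONDITION & SPEC =====
def Spec_detect_emotional_state (user_message : String) (out : List (String × String)) : Prop := out = detect_emotional_state_alt user_message
instance (user_message : String) (out : List (String × String)) : Decidable (Spec_detect_emotional_state user_message out) := by unfold Spec_detect_emotional_state; infer_instance

-- ===== CLAIM (what is proved, stated in full; the proofs are below) =====
def Claim_equal_detect_emotional_state : Prop := ∀ (user_message : String), Dom_detect_emotional_state user_message → Spec_detect_emotional_state user_message (detect_emotional_state user_message)

-- ===== LEMMAS AND PROOFS =====

-- the matches one table row contributes, in keyword order
def pvRow (lm : String) (c i e : String) (ks : List String) : List (List (String × String)) :=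
  (ks.filter (fun kw => PySem.Str.isIn kw lm)).map (fun kw => pvMkEmotion c kw i e)

-- A's match list in generation order
def pvMA (lm : String) : List (List (String × String)) :=
  pvIndicatorsA.flatMap (fun row => pvRow lm row.1 row.2.2.1 row.2.2.2 row.2.1)

-- B's match list in tier order
def pvMB (lm : String) : List (List (String × String)) :=
  pvTiersB.flatMap (fun tier => tier.flatMap (fun row => pvRow lm row.1 row.2.1 row.2.2.1 row.2.2.2))

-- first element of M strictly improving on everything before it = earliest maximum
def pvBest {α : Type} (key : α → Int) (M : List α) : Option α :=
  M.foldl (fun ob x => match ob with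
    | none => some x
    | some b => if key b < key x then some x else some b) none

def pvBest1 {α : Type} (key : α → Int) (a : α) (xs : List α) : α :=
  xs.foldl (fun b x => if key b < key x then x else b) a

-- A's nested append loop is flatMap of the per-row match lists
theorem pvMA_eq (um : String) :
    (pvIndicatorsA.foldl (fun acc row =>
      row.2.1.foldl (fun acc keyword =>
        if PySem.Str.isIn keyword (PySem.Str.lower um) then
          acc ++ [pvMkEmotion row.1 keyword row.2.2.1 row.2.2.2]
        else acc) acc) []) = pvMA (PySem.Str.lower um) := by
  simp only [PySem.List.foldl_append_if, PySem.List.foldl_append_eq_flatMap, pvMA, pvRow]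
  simp

theorem fs_if {α β : Type} (p : α → Bool) (f : α → β) (ks : List α) :
    ks.findSome? (fun kw => if p kw then some (f kw) else none) = ((ks.filter p).map f).head? := by
  induction ks with
  | nil => rfl
  | cons k ks ih => by_cases h : p k <;> simp [h, ih]

theorem fs_flat {α β : Type} (g : α → Option β) (m : α → List β) (l : List α)
    (h : ∀ a ∈ l, g a = (m a).head?) : l.findSome? g = (l.flatMap m).head? := by
  induction l with
  | nil => rfl
  | cons a l ih =>
    rw [List.flatMap_cons, List.findSome?_cons, h a (by simp), ih (fun x hx => h x (by simp [hx]))]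
    cases hm : (m a).head? with
    | none => cases ma : m a <;> simp_all
    | some b => cases ma : m a <;> simp_all

-- B's nested first-match search is the head of the tier-ordered match list
theorem pvMB_eq (um : String) :
    (pvTiersB.findSome? (fun tier =>
      tier.findSome? (fun row =>
        row.2.2.2.findSome? (fun keyword =>
          if PySem.Str.isIn keyword (PySem.Str.lower um) then
            some (pvMkEmotion row.1 keyword row.2.1 row.2.2.1)
          else none)))) = (pvMB (PySem.Str.lower um)).head? := by
  unfold pvMB
  apply fs_flat
  intro tier _
  apply fs_flat
  intro row _
  simp only [pvRow]
  exact fs_if _ _ _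

theorem head?_insertBy {α : Type} (bef : α → α → Bool) (x : α) (acc : List α) :
    (PySem.List.insertBy bef x acc).head? =
      match acc.head? with
      | none => some x
      | some h => if bef x h then some x else some h := by
  cases acc with
  | nil => rfl
  | cons h t => by_cases hb : bef x h <;> simp [PySem.List.insertBy, hb]

theorem foldl_insertBy_head? {α : Type} (key : α → Int) (xs : List α) (acc : List α) :
    (xs.foldl (fun acc x => PySem.List.insertBy (fun a b => decide (key b < key a)) x acc) acc).head? =
      xs.foldl (fun ob x => match ob with
        | none => some x
        | some b => if key b < key x then some x else some b) acc.head? := by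
  induction xs generalizing acc with
  | nil => rfl
  | cons x xs ih =>
    rw [List.foldl_cons, List.foldl_cons, ih, head?_insertBy]
    cases acc.head? with
    | none => rfl
    | some h => by_cases hb : key h < key x <;> simp [hb]

-- head of Python's stable descending sort = earliest maximum
theorem sortedRev_head? {α : Type} (key : α → Int) (M : List α) :
    (PySem.List.sorted M key true).head? = pvBest key M := by
  rw [PySem.List.sorted_rev_eq_foldl_insertBy, foldl_insertBy_head?]; rfl

theorem pvBest_cons {α : Type} (key : α → Int) (x : α) (xs : List α) :
    pvBest key (x :: xs) = some (pvBest1 key x xs) := by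
  suffices h : ∀ (ys : List α) (a : α),
      (ys.foldl (fun ob x => match ob with
        | none => some x
        | some b => if key b < key x then some x else some b) (some a)) = some (pvBest1 key a ys) by
    exact h xs x
  intro ys
  induction ys with
  | nil => intro a; rfl
  | cons y ys ih =>
    intro a
    rw [List.foldl_cons]
    by_cases hb : key a < key y <;> simp only [hb, if_pos, ite_false] <;>
      rw [ih] <;> simp [pvBest1, hb]

theorem pvBest1_of_max {α : Type} (key : α → Int) (a : α) (xs : List α)
    (h : ∀ y ∈ xs, key y ≤ key a) : pvBest1 key a xs = a := by
  induction xs with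
  | nil => rfl
  | cons x xs ih =>
    have hx : ¬ key a < key x := by have := h x (by simp); omega
    simp only [pvBest1, List.foldl_cons, hx, ite_false]
    exact ih (fun y hy => h y (by simp [hy]))

theorem pvBest1_reach {α : Type} (key : α → Int) (K : Int) (xs : List α) :
    ∀ (a : α) (z : α) (zs : List α), (∀ y ∈ xs, key y ≤ K) → key a < K →
    xs.filter (fun y => key y = K) = z :: zs → pvBest1 key a xs = z := by
  induction xs with
  | nil => intro a z zs _ _ h; simp at h
  | cons x xs ih =>
    intro a z zs hub ha hf
    by_cases hK : key x = K
    · rw [List.filter_cons_of_pos (by simp [hK])] at hf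
      rw [List.cons.injEq] at hf
      obtain ⟨rfl, -⟩ := hf
      have hlt : key a < key x := by omega
      simp only [pvBest1, List.foldl_cons, if_pos hlt]
      exact pvBest1_of_max key x xs (fun y hy => by have := hub y (by simp [hy]); omega)
    · rw [List.filter_cons_of_neg (by simp [hK])] at hf
      have hxK : key x < K := by have := hub x (by simp); omega
      simp only [pvBest1, List.foldl_cons]
      by_cases hax : key a < key x <;> simp only [hax, ite_true, ite_false] <;>
        exact ih _ z zs (fun y hy => hub y (by simp [hy])) (by omega) hf

theorem first_level {α : Type} (key : α → Int) (K : Int) (m : α) (M' : List α)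
    (hub : ∀ x ∈ m :: M', key x ≤ K) {z : α} {zs : List α}
    (hf : (m :: M').filter (fun y => key y = K) = z :: zs) : pvBest1 key m M' = z := by
  by_cases hm : key m = K
  · rw [List.filter_cons_of_pos (by simp [hm])] at hf
    rw [List.cons.injEq] at hf
    obtain ⟨rfl, -⟩ := hf
    exact pvBest1_of_max key m M' (fun y hy => by have := hub y (by simp [hy]); omega)
  · rw [List.filter_cons_of_neg (by simp [hm])] at hf
    exact pvBest1_reach key K M' m z zs (fun y hy => hub y (by simp [hy]))
      (by have := hub m (by simp); omega) hf

-- stable partition by key ∈ {4,3,2,1}: its head is also the earliest maximum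
theorem partition_head? {α : Type} (key : α → Int) (M : List α)
    (h : ∀ x ∈ M, 1 ≤ key x ∧ key x ≤ 4) :
    (M.filter (fun y => key y = 4) ++ M.filter (fun y => key y = 3) ++
     M.filter (fun y => key y = 2) ++ M.filter (fun y => key y = 1)).head? = pvBest key M := by
  cases M with
  | nil => rfl
  | cons m M' =>
    rw [pvBest_cons]
    set M := m :: M' with hMdef
    have hub4 : ∀ x ∈ M, key x ≤ 4 := fun x hx => (h x hx).2
    cases hf4 : M.filter (fun y => key y = 4) with
    | cons z zs => simp [first_level key 4 m M' hub4 hf4, hf4]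
    | nil =>
      have hub3 : ∀ x ∈ M, key x ≤ 3 := by
        intro x hx
        have h4 := List.filter_eq_nil_iff.mp hf4 x hx
        have := hub4 x hx; simp at h4; omega
      cases hf3 : M.filter (fun y => key y = 3) with
      | cons z zs => simp [first_level key 3 m M' hub3 hf3, hf4, hf3]
      | nil =>
        have hub2 : ∀ x ∈ M, key x ≤ 2 := by
          intro x hx
          have h3 := List.filter_eq_nil_iff.mp hf3 x hx
          have := hub3 x hx; simp at h3; omega
        cases hf2 : M.filter (fun y => key y = 2) with
        | cons z zs => simp [first_level key 2 m M' hub2 hf2, hf4, hf3, hf2]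
        | nil =>
          have hub1 : ∀ x ∈ M, key x ≤ 1 := by
            intro x hx
            have h2 := List.filter_eq_nil_iff.mp hf2 x hx
            have := hub2 x hx; simp at h2; omega
          cases hf1 : M.filter (fun y => key y = 1) with
          | cons z zs => simp [first_level key 1 m M' hub1 hf1, hf4, hf3, hf2, hf1]
          | nil =>
            exfalso
            have h1 := List.filter_eq_nil_iff.mp hf1 m (by simp [hMdef])
            have := hub1 m (by simp [hMdef])
            have := (h m (by simp [hMdef])).1
            simp at h1; omega

-- the sort key of every dict either loop builds, by computation
theorem keyA_mk (c kw i e : String) :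
    pvKeyA (pvMkEmotion c kw i e) = PySem.Dict.getD pvIntensityOrder i 0 := rfl
theorem keyA_vh (c kw e : String) : pvKeyA (pvMkEmotion c kw "very_high" e) = 4 := rfl
theorem keyA_h (c kw e : String) : pvKeyA (pvMkEmotion c kw "high" e) = 3 := rfl
theorem keyA_m (c kw e : String) : pvKeyA (pvMkEmotion c kw "medium" e) = 2 := rfl
theorem keyA_l (c kw e : String) : pvKeyA (pvMkEmotion c kw "low" e) = 1 := rfl
theorem getD_vh : PySem.Dict.getD pvIntensityOrder "very_high" 0 = 4 := rfl
theorem getD_h : PySem.Dict.getD pvIntensityOrder "high" 0 = 3 := rfl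
theorem getD_m : PySem.Dict.getD pvIntensityOrder "medium" 0 = 2 := rfl
theorem getD_l : PySem.Dict.getD pvIntensityOrder "low" 0 = 1 := rfl

theorem filter_pvRow (lm c i e : String) (ks : List String) (r : Int) :
    (pvRow lm c i e ks).filter (fun y => pvKeyA y = r) =
      if PySem.Dict.getD pvIntensityOrder i 0 = r then pvRow lm c i e ks else [] := by
  simp only [pvRow, List.filter_map]
  by_cases h : PySem.Dict.getD pvIntensityOrder i 0 = r
  · simp [keyA_mk, h]
  · simp [keyA_mk, h]

theorem keys_MA (lm : String) : ∀ x ∈ pvMA lm, 1 ≤ pvKeyA x ∧ pvKeyA x ≤ 4 := by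
  intro x hx
  simp only [pvMA, pvIndicatorsA, List.flatMap_cons, List.flatMap_nil, List.append_nil,
    List.mem_append] at hx
  rcases hx with h|h|h|h|h|h|h|h <;>
    (simp only [pvRow, List.mem_map] at h; obtain ⟨kw, -, rfl⟩ := h;
     simp [keyA_vh, keyA_h, keyA_m, keyA_l])

-- B's tier table is exactly the stable partition of A's match list by intensity
theorem partition_MA (lm : String) :
    (pvMA lm).filter (fun y => pvKeyA y = 4) ++ (pvMA lm).filter (fun y => pvKeyA y = 3) ++
    (pvMA lm).filter (fun y => pvKeyA y = 2) ++ (pvMA lm).filter (fun y => pvKeyA y = 1) = pvMB lm := by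
  simp [pvMA, pvMB, pvIndicatorsA, pvTiersB, List.filter_append, filter_pvRow,
    getD_vh, getD_h, getD_m, getD_l]

-- ===== VERDICT (by name: the statement is the Claim_ definition above) =====
theorem detect_emotional_state_spec : Claim_equal_detect_emotional_state := by
  intro um _
  unfold Spec_detect_emotional_state detect_emotional_state detect_emotional_state_alt
  simp only [pvMA_eq um, pvMB_eq um]
  have hhead : (pvMB (PySem.Str.lower um)).head? = pvBest pvKeyA (pvMA (PySem.Str.lower um)) := by
    rw [← partition_MA (PySem.Str.lower um)]
    exact partition_head? pvKeyA _ (keys_MA _)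
  by_cases hM : pvMA (PySem.Str.lower um) = []
  · rw [hM] at hhead ⊢
    simp [pvBest] at hhead
    simp [hhead]
  · have hs := sortedRev_head? pvKeyA (pvMA (PySem.Str.lower um))
    rw [hhead, ← hs]
    have hns : PySem.List.sorted (pvMA (PySem.Str.lower um)) pvKeyA true ≠ [] := by
      simpa [PySem.List.sorted_eq_nil_iff] using hM
    cases hsort : PySem.List.sorted (pvMA (PySem.Str.lower um)) pvKeyA true with
    | nil => exact absurd hsort hns
    | cons a t => simp [hM]
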